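-- pv_equiv track=rewrite | github.com/maciek3000/data_dashboard | data_dashboard/functions.py | replace_duplicate_str
-- ===== SOURCE A (Python) =====
-- from collections import Counter, defaultdict
--
-- def replace_duplicate_str(duplicate_list_of_str):
--     """Replace every duplicate instance of string element in duplicate_list_of_str with new string indicating which
--     duplicate element it is. Return unchanged duplicate_list_of_str if there are no duplicates.
--
--     Examples:
--         [a, b, a, b, c, a] --> [a #1, b #1, a #2, b #2, c, a #3] \n
--         [a, b] --> [a, b]
--
--     Args:
--         duplicate_list_of_str ({list, iterable}): list which can contain duplicate string elements
--
--     Returns: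
--         list: list with counted duplicates or duplicate_list_of_str if no duplicates are present.
--     """
--     if len(set(duplicate_list_of_str)) != len(duplicate_list_of_str):
--         base_cnt = Counter(duplicate_list_of_str)
--         item_cnt = defaultdict(int)
--         new_sequence = []
--
--         for item in duplicate_list_of_str:
--             if base_cnt[item] > 1:
--                 new_item = item + " #" + str(item_cnt[item] + 1)
--                 item_cnt[item] += 1
--                 new_sequence.append(new_item)
--             else:
--                 new_sequence.append(item)
--
--         return new_sequence
--     else:
--         return duplicate_list_of_str
-- ===== SOURCE B (Python) =====
-- def replace_duplicate_str(duplicate_list_of_str):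
--     if len(set(duplicate_list_of_str)) == len(duplicate_list_of_str):
--         return duplicate_list_of_str
--     positions = {}
--     for i, v in enumerate(duplicate_list_of_str):
--         positions.setdefault(v, []).append(i)
--     labels = {}
--     for v, idxs in positions.items():
--         if len(idxs) > 1:
--             for k, idx in enumerate(idxs):
--                 labels[idx] = v + " #" + str(k + 1)
--     return [labels.get(i, v) for i, v in enumerate(duplicate_list_of_str)]
-- ===== Notes on version B (the rewrite author's own statement) =====
-- stated objective: alternative
-- what changed: Replaces A's single stateful pass (Counter plus running per-item counters) with three staged passes: build an inverted index value->positions, scatter-build an index->label dict for groups with more than one position, then map a dict lookup over enumerate.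
import Mathlib
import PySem

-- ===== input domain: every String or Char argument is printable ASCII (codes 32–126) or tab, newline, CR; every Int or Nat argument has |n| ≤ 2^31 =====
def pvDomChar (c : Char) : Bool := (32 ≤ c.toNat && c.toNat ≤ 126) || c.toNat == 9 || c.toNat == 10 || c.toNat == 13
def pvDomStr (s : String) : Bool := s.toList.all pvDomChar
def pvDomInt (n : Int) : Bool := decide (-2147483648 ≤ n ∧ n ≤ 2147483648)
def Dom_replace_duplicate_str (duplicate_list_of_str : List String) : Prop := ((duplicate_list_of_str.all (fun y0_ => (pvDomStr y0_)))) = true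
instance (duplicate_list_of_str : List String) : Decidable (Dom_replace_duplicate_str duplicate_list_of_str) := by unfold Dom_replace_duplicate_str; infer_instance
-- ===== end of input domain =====

-- B replaces A's single stateful pass (Counter + running per-item counters) with staged
-- passes: an inverted index value -> positions, then an index -> label dict for duplicate
-- groups, then a lookup map; objective: alternative (same O(n) cost, different structure).

-- ===== PORT A =====
def replace_duplicate_str (duplicate_list_of_str : List String) : List String :=
  if (PySem.Set.ofList duplicate_list_of_str).length ≠ duplicate_list_of_str.length then
    let base_cnt : PySem.Dict String Int := PySem.Dict.counter duplicate_list_of_str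
    (duplicate_list_of_str.foldl
      (fun (st : PySem.Dict String Int × List String) item =>
        if base_cnt.getD item 0 > 1 then
          -- new_item uses item_cnt[item] + 1 (defaultdict default 0), then item_cnt[item] += 1
          (st.1.insert item (st.1.getD item 0 + 1),
           st.2 ++ [item ++ " #" ++ PySem.Int.toStr (st.1.getD item 0 + 1)])
        else
          (st.1, st.2 ++ [item]))
      (PySem.Dict.empty, [])).2
  else
    duplicate_list_of_str

-- ===== PORT B =====
def replace_duplicate_str_alt (duplicate_list_of_str : List String) : List String :=
  if (PySem.Set.ofList duplicate_list_of_str).length = duplicate_list_of_str.length then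
    duplicate_list_of_str
  else
    -- positions.setdefault(v, []).append(i)  ==  positions[v] = positions.get(v, []) + [i]
    let positions : PySem.Dict String (List Int) :=
      (PySem.List.enumerate duplicate_list_of_str 0).foldl
        (fun d q => d.modify q.2 [] (· ++ [q.1])) PySem.Dict.empty
    let labels : PySem.Dict Int String :=
      positions.items.foldl
        (fun lab pr =>
          if pr.2.length > 1 then
            (PySem.List.enumerate pr.2 0).foldl
              (fun lab2 q => lab2.insert q.2 (pr.1 ++ " #" ++ PySem.Int.toStr (q.1 + 1))) lab
          else lab)
        PySem.Dict.empty
    (PySem.List.enumerate duplicate_list_of_str 0).map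
      (fun q => (labels.get? q.1).getD q.2)

-- ===== PRECONDITION & SPEC =====
def Spec_replace_duplicate_str (duplicate_list_of_str : List String) (out : List String) : Prop := out = replace_duplicate_str_alt duplicate_list_of_str
instance (duplicate_list_of_str : List String) (out : List String) : Decidable (Spec_replace_duplicate_str duplicate_list_of_str out) := by unfold Spec_replace_duplicate_str; infer_instance

-- ===== CLAIM (what is proved, stated in full; the proofs are below) =====
def Claim_equal_replace_duplicate_str : Prop := ∀ (duplicate_list_of_str : List String), Dom_replace_duplicate_str duplicate_list_of_str → Spec_replace_duplicate_str duplicate_list_of_str (replace_duplicate_str duplicate_list_of_str)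

-- ===== LEMMAS AND PROOFS =====

-- Common reference value: position q.1 gets x[q.1] if unique, else the prefix-count label.
def mapB (x : List String) : List String :=
  (PySem.List.enumerate x 0).map (fun q =>
    if x.count q.2 = 1 then q.2
    else q.2 ++ " #" ++ PySem.Int.toStr (((x.take q.1.toNat).count q.2 : Int) + 1))

-- ---------- A-side ----------

-- The body of A's loop, as a function of the fixed Counter bc.
def stepA (bc : PySem.Dict String Int) (st : PySem.Dict String Int × List String) (item : String) :
    PySem.Dict String Int × List String :=
  if bc.getD item 0 > 1 then
    (st.1.insert item (st.1.getD item 0 + 1),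
     st.2 ++ [item ++ " #" ++ PySem.Int.toStr (st.1.getD item 0 + 1)])
  else
    (st.1, st.2 ++ [item])

-- A's loop with the accumulator stripped off.
def goA (bc : PySem.Dict String Int) : PySem.Dict String Int → List String → List String
  | _, [] => []
  | cnt, v :: t =>
    if bc.getD v 0 > 1 then
      (v ++ " #" ++ PySem.Int.toStr (cnt.getD v 0 + 1)) :: goA bc (cnt.insert v (cnt.getD v 0 + 1)) t
    else
      v :: goA bc cnt t

theorem foldl_stepA_eq_goA (bc : PySem.Dict String Int) (t : List String) :
    ∀ (cnt : PySem.Dict String Int) (acc : List String),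
      (t.foldl (stepA bc) (cnt, acc)).2 = acc ++ goA bc cnt t := by
  induction t with
  | nil => intro cnt acc; simp [goA]
  | cons v t ih =>
    intro cnt acc
    by_cases h : bc.getD v 0 > 1
    · simp [List.foldl_cons, stepA, goA, h, ih]
    · simp [List.foldl_cons, stepA, goA, h, ih]

-- Main invariant: A's stateful numbering equals the prefix-count numbering.
theorem goA_eq_mapB (x : List String) :
    ∀ (s p : List String) (cnt : PySem.Dict String Int),
      x = p ++ s →
      (∀ v ∈ s, cnt.getD v 0 = (p.count v : Int)) →
      goA (PySem.Dict.counter x) cnt s =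
        (PySem.List.enumerate s (p.length : Int)).map (fun q =>
          if x.count q.2 = 1 then q.2
          else q.2 ++ " #" ++ PySem.Int.toStr (((x.take q.1.toNat).count q.2 : Int) + 1)) := by
  intro s
  induction s with
  | nil => intro p cnt _ _; simp [goA, PySem.List.enumerate_nil]
  | cons v t ih =>
    intro p cnt hx hinv
    have hcntv : cnt.getD v 0 = (p.count v : Int) := hinv v (by simp)
    have htake : ((p.length : Int)).toNat = p.length := by simp
    have hpref : x.take p.length = p := by rw [hx, List.take_left]
    rw [PySem.List.enumerate_cons, List.map_cons]
    by_cases h : (PySem.Dict.counter x).getD v 0 > 1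
    · have hcount : ¬ x.count v = 1 := by
        rw [PySem.Dict.getD_counter] at h
        omega
      rw [goA]
      simp only [h, if_true, hcount, if_false, htake, hpref, hcntv]
      congr 1
      have hlen : (p.length : Int) + 1 = ((p ++ [v]).length : Int) := by simp
      rw [hlen]
      apply ih (p ++ [v])
      · rw [hx]; simp
      · intro w hw
        rcases eq_or_ne w v with rfl | hne
        · rw [PySem.Dict.getD_insert]
          simp [List.count_append]
        · rw [PySem.Dict.getD_insert]
          simp only [hne, if_false]
          rw [hinv w (by simp [hw])]
          simp [List.count_append, Ne.symm hne]
    · have hcount : x.count v = 1 := by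
        rw [PySem.Dict.getD_counter] at h
        have : 1 ≤ x.count v := List.one_le_count_iff.mpr (by rw [hx]; simp)
        omega
      rw [goA]
      simp only [h, if_false, hcount, if_true]
      congr 1
      have hlen : (p.length : Int) + 1 = ((p ++ [v]).length : Int) := by simp
      rw [hlen]
      apply ih (p ++ [v])
      · rw [hx]; simp
      · intro w hw
        have hne : w ≠ v := by
          rintro rfl
          have ht : 1 ≤ t.count w := List.one_le_count_iff.mpr hw
          have hxc : x.count w = p.count w + (t.count w + 1) := by
            rw [hx]; simp [List.count_append]
          omega
        rw [hinv w (by simp [hw])]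
        simp [List.count_append, Ne.symm hne]

theorem A_eq_mapB (x : List String) :
    (x.foldl (stepA (PySem.Dict.counter x)) (PySem.Dict.empty, [])).2 = mapB x := by
  have hmain := goA_eq_mapB x x [] PySem.Dict.empty rfl
    (by intro v _; simp [PySem.Dict.getD_empty])
  simp only [List.length_nil, Nat.cast_zero] at hmain
  rw [foldl_stepA_eq_goA, List.nil_append, hmain, mapB]

-- ---------- B-side ----------

-- The list of positions of v in x, enumerated from s.
def Iv (x : List String) (v : String) (s : Int) : List Int :=
  ((PySem.List.enumerate x s).filter (fun q => q.2 == v)).map (·.1)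

theorem length_Iv (x : List String) (v : String) : ∀ s, (Iv x v s).length = x.count v := by
  induction x with
  | nil => intro s; simp [Iv, PySem.List.enumerate_nil]
  | cons a t ih =>
    intro s
    rcases eq_or_ne a v with rfl | hne
    · simp [Iv, PySem.List.enumerate_cons] at *
      simpa using ih (s + 1)
    · simp [Iv, PySem.List.enumerate_cons, hne] at *
      simpa using ih (s + 1)

theorem mem_Iv (x : List String) (v : String) (s j : Int) :
    j ∈ Iv x v s ↔ ∃ (k : Nat), ∃ (h : k < x.length), x[k] = v ∧ j = s + k := by
  simp only [Iv, List.mem_map, List.mem_filter, PySem.List.mem_enumerate_iff]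
  constructor
  · rintro ⟨q, ⟨⟨k, hk, rfl⟩, hv⟩, rfl⟩
    exact ⟨k, hk, by simpa using hv, rfl⟩
  · rintro ⟨k, hk, hv, rfl⟩
    exact ⟨(s + k, x[k]), ⟨⟨k, hk, rfl⟩, by simpa using hv⟩, rfl⟩

theorem nodup_Iv (x : List String) (v : String) (s : Int) : (Iv x v s).Nodup := by
  have hp : ((PySem.List.enumerate x s).filter (fun q => q.2 == v)).Pairwise (fun p q => p.1 < q.1) :=
    (PySem.List.pairwise_lt_enumerate x s).filter _
  have h2 : (Iv x v s).Pairwise (· < ·) := hp.map _ (fun a b h => h)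
  exact List.Pairwise.imp (fun h => ne_of_lt h) h2

theorem idxOf_Iv (x : List String) (v : String) :
    ∀ (s : Int) (k : Nat) (hk : k < x.length), x[k] = v →
      (Iv x v s).idxOf (s + k) = (x.take k).count v := by
  induction x with
  | nil => intro s k hk; simp at hk
  | cons a t ih =>
    intro s k hk hv
    rcases eq_or_ne a v with rfl | hne
    · have hIv : Iv (a :: t) a s = s :: Iv t a (s + 1) := by
        simp [Iv, PySem.List.enumerate_cons]
      rw [hIv]
      cases k with
      | zero => simp
      | succ k =>
        have hne' : s ≠ s + ((k + 1 : Nat) : Int) := by push_cast; omega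
        rw [List.idxOf_cons_ne _ hne']
        have : s + ((k : Nat) + 1 : Nat) = (s + 1) + (k : Nat) := by push_cast; ring
        rw [this, ih (s + 1) k (by simpa using hk) (by simpa using hv)]
        simp
    · have hIv : Iv (a :: t) v s = Iv t v (s + 1) := by
        simp [Iv, PySem.List.enumerate_cons, hne]
      cases k with
      | zero => exact absurd (by simpa using hv) hne
      | succ k =>
        rw [hIv]
        have : s + ((k : Nat) + 1 : Nat) = (s + 1) + (k : Nat) := by push_cast; ring
        rw [this, ih (s + 1) k (by simpa using hk) (by simpa using hv)]
        simp [hne]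

-- positions.getD v [] is exactly Iv x v 0.
theorem positions_getD (x : List String) (v : String) :
    (((PySem.List.enumerate x 0).foldl
        (fun d q => d.modify q.2 [] (· ++ [q.1])) PySem.Dict.empty).getD v []) = Iv x v 0 := by
  have h1 : (PySem.List.enumerate x 0).foldl
        (fun d q => d.modify q.2 [] (· ++ [q.1])) PySem.Dict.empty
      = ((PySem.List.enumerate x 0).map (fun q => (q.2, q.1))).foldl
          (fun d p => d.modify p.1 [] (· ++ [p.2])) PySem.Dict.empty := by
    rw [List.foldl_map]
  rw [h1, PySem.Dict.getD_foldl_modify_append]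
  simp [Iv, List.filter_map, List.map_map, Function.comp_def, PySem.Dict.getD_empty]

theorem positions_keys (x : List String) :
    ((PySem.List.enumerate x 0).foldl
        (fun d q => d.modify q.2 [] (· ++ [q.1])) PySem.Dict.empty).keys = PySem.Set.ofList x := by
  rw [PySem.Dict.keys_foldl_modify_key, PySem.Dict.keys_empty, PySem.List.map_snd_enumerate]
  rfl

theorem positions_nodup_keys (x : List String) :
    ((PySem.List.enumerate x 0).foldl
        (fun d q => d.modify q.2 [] (· ++ [q.1])) PySem.Dict.empty).keys.Nodup := by
  rw [positions_keys]
  exact PySem.Set.nodup_ofList x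

-- Lookup through the inner fold over one group's enumerated positions.
theorem inner_get (g : Int → String) (j : Int) :
    ∀ (idxs : List Int), idxs.Nodup → ∀ (s : Int) (d : PySem.Dict Int String),
      ((PySem.List.enumerate idxs s).foldl (fun d2 q => d2.insert q.2 (g q.1)) d).get? j =
        if j ∈ idxs then some (g (s + (idxs.idxOf j : Int))) else d.get? j := by
  intro idxs
  induction idxs with
  | nil => intro _ s d; simp [PySem.List.enumerate_nil]
  | cons a t ih =>
    intro hnd s d
    have ha : a ∉ t := (List.nodup_cons.mp hnd).1
    have hndt : t.Nodup := (List.nodup_cons.mp hnd).2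
    rw [PySem.List.enumerate_cons, List.foldl_cons, ih hndt (s + 1)]
    by_cases hj : j = a
    · subst hj
      have hjt : j ∉ t := ha
      simp [hjt, PySem.Dict.get?_insert_self]
    · have hgj : (d.insert a (g s)).get? j = d.get? j :=
        PySem.Dict.get?_insert_of_ne d _ hj
      by_cases hm : j ∈ t
      · have hidx : (a :: t).idxOf j = t.idxOf j + 1 := List.idxOf_cons_ne _ (Ne.symm hj)
        have harith : s + 1 + (t.idxOf j : Int) = s + ((t.idxOf j + 1 : Nat) : Int) := by
          push_cast; ring
        simp [hm, hj, hidx, harith]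
      · have hm' : j ∉ a :: t := by simp [hj, hm]
        simp [hm, hm', hgj]

-- Lookup through the outer fold over the groups.
theorem outer_get (x : List String) (j : Int) (v : String) (hmem : ∀ w, j ∈ Iv x w 0 ↔ w = v) :
    ∀ (K : List String), K.Nodup → ∀ (d : PySem.Dict Int String),
      ((K.map (fun w => (w, Iv x w 0))).foldl
          (fun lab pr =>
            if pr.2.length > 1 then
              (PySem.List.enumerate pr.2 0).foldl
                (fun lab2 q => lab2.insert q.2 (pr.1 ++ " #" ++ PySem.Int.toStr (q.1 + 1))) lab
            else lab) d).get? j =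
        if v ∈ K ∧ 1 < x.count v then
          some (v ++ " #" ++ PySem.Int.toStr (((Iv x v 0).idxOf j : Int) + 1))
        else d.get? j := by
  intro K
  induction K with
  | nil => intro _ d; simp
  | cons w t ih =>
    intro hnd d
    have hw : w ∉ t := (List.nodup_cons.mp hnd).1
    have hndt : t.Nodup := (List.nodup_cons.mp hnd).2
    rw [List.map_cons, List.foldl_cons]
    by_cases hlen : (Iv x w 0).length > 1
    · have hinner := inner_get (fun i => w ++ " #" ++ PySem.Int.toStr (i + 1)) j
        (Iv x w 0) (nodup_Iv x w 0) 0 d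
      rcases eq_or_ne w v with rfl | hne
      · have hjv : j ∈ Iv x w 0 := (hmem w).mpr rfl
        have hcnt : 1 < x.count w := by rw [← length_Iv x w 0]; exact hlen
        have hvt : w ∉ t := hw
        simp only [hlen, if_true]
        rw [ih hndt]
        simp only [hvt, false_and, if_false, hinner, hjv, if_true]
        simp [hcnt]
      · have hjw : j ∉ Iv x w 0 := fun h => hne ((hmem w).mp h)
        simp only [hlen, if_true]
        rw [ih hndt]
        simp only [hinner, hjw, if_false]
        by_cases hvt : v ∈ t ∧ 1 < x.count v
        · simp [hvt]
        · simp only [hvt, if_false]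
          have : ¬ (v ∈ w :: t ∧ 1 < x.count v) := by
            intro hc
            rcases hc with ⟨hv1, hv2⟩
            rcases List.mem_cons.mp hv1 with h | h
            · exact hne h.symm
            · exact hvt ⟨h, hv2⟩
          rw [if_neg this]
    · simp only [hlen, if_false]
      rw [ih hndt]
      rcases eq_or_ne w v with rfl | hne
      · have hcnt : ¬ 1 < x.count w := by rw [← length_Iv x w 0]; exact hlen
        simp [hw, hcnt]
      · have : (v ∈ w :: t ∧ 1 < x.count v) ↔ (v ∈ t ∧ 1 < x.count v) := by
          constructor
          · rintro ⟨hv1, hv2⟩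
            rcases List.mem_cons.mp hv1 with h | h
            · exact absurd h.symm hne
            · exact ⟨h, hv2⟩
          · rintro ⟨hv1, hv2⟩; exact ⟨List.mem_cons_of_mem _ hv1, hv2⟩
        by_cases hc : v ∈ t ∧ 1 < x.count v
        · simp [hc]
        · rw [if_neg hc, if_neg (fun hcc => hc (this.mp hcc))]

theorem B_body_eq_mapB (x : List String) :
    (PySem.List.enumerate x 0).map
        (fun q => ((((PySem.List.enumerate x 0).foldl
            (fun d q => d.modify q.2 [] (· ++ [q.1])) PySem.Dict.empty).items.foldl
          (fun lab pr =>
            if pr.2.length > 1 then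
              (PySem.List.enumerate pr.2 0).foldl
                (fun lab2 q => lab2.insert q.2 (pr.1 ++ " #" ++ PySem.Int.toStr (q.1 + 1))) lab
            else lab)
          PySem.Dict.empty).get? q.1).getD q.2) = mapB x := by
  have hitems : ((PySem.List.enumerate x 0).foldl
      (fun d q => d.modify q.2 [] (· ++ [q.1])) PySem.Dict.empty).items
      = (PySem.Set.ofList x).map (fun w => (w, Iv x w 0)) := by
    rw [PySem.Dict.items_eq_map_keys _ (positions_nodup_keys x) []]
    rw [positions_keys]
    exact List.map_congr_left (fun w _ => by rw [positions_getD])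
  unfold mapB
  apply List.map_congr_left
  intro q hq
  rw [PySem.List.mem_enumerate_iff] at hq
  obtain ⟨k, hk, rfl⟩ := hq
  have hj0 : (0 : Int) + (k : Int) = (k : Int) := by ring
  have hmem : ∀ w, ((k : Int) ∈ Iv x w 0) ↔ w = x[k] := by
    intro w
    rw [mem_Iv]
    constructor
    · rintro ⟨k', hk', hv, hjk⟩
      have : k' = k := by omega
      subst this; exact hv.symm
    · rintro rfl
      exact ⟨k, hk, rfl, by omega⟩
  rw [hitems, hj0, outer_get x (k : Int) x[k] hmem _ (PySem.Set.nodup_ofList x) _]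
  have hvK : x[k] ∈ PySem.Set.ofList x :=
    (PySem.Set.mem_ofList _ _).mpr (List.getElem_mem hk)
  have hcnt1 : 1 ≤ x.count x[k] := List.one_le_count_iff.mpr (List.getElem_mem hk)
  by_cases hc : x.count x[k] = 1
  · have : ¬ 1 < x.count x[k] := by omega
    simp [hvK, hc, PySem.Dict.get?_empty]
  · have hgt : 1 < x.count x[k] := by omega
    have hidx : (Iv x x[k] 0).idxOf ((k : Int)) = (x.take k).count x[k] := by
      have := idxOf_Iv x x[k] 0 k hk rfl
      simpa [hj0] using this
    simp only [hvK, hgt, and_self, if_true, hc, if_false, Option.getD_some]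
    rw [hidx]
    simp [Int.toNat_natCast]

-- ===== VERDICT (by name: the statement is the Claim_ definition above) =====
theorem replace_duplicate_str_spec : Claim_equal_replace_duplicate_str := by
  intro x _
  unfold Spec_replace_duplicate_str replace_duplicate_str replace_duplicate_str_alt
  by_cases hg : (PySem.Set.ofList x).length = x.length
  · simp [hg]
  · simp only [hg, if_false, ne_eq, not_false_iff, if_true]
    exact (A_eq_mapB x).trans (B_body_eq_mapB x).symm
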